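-- pv_equiv track=rewrite | github.com/exact-coder/Competitive-Programming | CodeForces/1993B_Parity_and_Sum.py | func
-- ===== SOURCE A (Python) =====
-- def func(even,odd):
--     n1 = len(even)
--     n2 = len(odd)
--     mx = odd[-1]
--     ans =0
--     for i in range(n1):
--         if even[i] > mx:
--             return (n1 + 1)
--         else:
--             ans+=1
--             mx += even[i]
--     return ans
-- ===== SOURCE B (Python) =====
-- def func(even, odd):
--     t = odd[-1]
--     thresholds = []
--     for e in even:
--         thresholds.append(t)
--         t += e
--     n1 = len(even)
--     return n1 + 1 if any(e > th for e, th in zip(even, thresholds)) else n1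
-- ===== Notes on version B (the rewrite author's own statement) =====
-- stated objective: alternative
-- what changed: Replaces A's single stateful loop with early return by a two-phase decomposition: first build the running-threshold table (prefix sums of even seeded with odd[-1]), then one any-scan comparing each even[i] to its threshold.
import Mathlib
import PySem

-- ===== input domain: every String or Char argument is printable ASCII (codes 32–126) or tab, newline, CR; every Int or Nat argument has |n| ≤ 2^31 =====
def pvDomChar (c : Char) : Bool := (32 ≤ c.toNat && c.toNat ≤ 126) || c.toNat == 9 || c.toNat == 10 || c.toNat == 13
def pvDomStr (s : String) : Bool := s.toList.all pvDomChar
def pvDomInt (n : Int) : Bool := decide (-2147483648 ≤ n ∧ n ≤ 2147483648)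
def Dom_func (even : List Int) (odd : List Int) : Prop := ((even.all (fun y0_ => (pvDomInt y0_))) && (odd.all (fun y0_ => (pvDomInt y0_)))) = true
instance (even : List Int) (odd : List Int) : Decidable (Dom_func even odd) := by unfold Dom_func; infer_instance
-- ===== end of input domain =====

-- B replaces A's single stateful early-return loop by a two-phase decomposition
-- (build a threshold table, then one any-scan); objective: alternative, same cost.


-- ===== PORT A =====
-- A's loop: early return n1+1 on even[i] > mx, else mx += even[i], ans += 1.
def funcGo (l : List Int) (mx ans n1 : Int) : Int :=
  match l with
  | [] => ans
  | e :: rest => if e > mx then n1 + 1 else funcGo rest (mx + e) (ans + 1) n1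

def func (even : List Int) (odd : List Int) : Int :=
  match PySem.List.pyGet? odd (-1) with
  | none => 0   -- IndexError in Python: excluded by Pre_func
  | some mx => funcGo even mx 0 (even.length : Int)

-- ===== PORT B =====
-- threshold table: t starts at odd[-1]; append t, then t += e
def buildThresholds (l : List Int) (t : Int) : List Int :=
  match l with
  | [] => []
  | e :: rest => t :: buildThresholds rest (t + e)

def func_alt (even : List Int) (odd : List Int) : Int :=
  match PySem.List.pyGet? odd (-1) with
  | none => 0   -- IndexError in Python: excluded by Pre_func
  | some t =>
    let thresholds := buildThresholds even t
    if (even.zip thresholds).any (fun p => p.1 > p.2) then (even.length : Int) + 1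
    else (even.length : Int)

-- ===== PRECONDITION & SPEC =====
-- A (and B) raise IndexError on odd[-1] when odd is empty.
def Pre_func (even : List Int) (odd : List Int) : Prop := odd ≠ []
instance (even : List Int) (odd : List Int) : Decidable (Pre_func even odd) := by unfold Pre_func; infer_instance
def pvWitness_func : List Int × List Int := ([2, 4], [3])

def Spec_func (even : List Int) (odd : List Int) (out : Int) : Prop := out = func_alt even odd
instance (even : List Int) (odd : List Int) (out : Int) : Decidable (Spec_func even odd out) := by unfold Spec_func; infer_instance

-- ===== CLAIM (what is proved, stated in full; the proofs are below) =====
def Claim_equal_func : Prop := ∀ (even : List Int) (odd : List Int), Dom_func even odd → Pre_func even odd → Spec_func even odd (func even odd)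

-- ===== LEMMAS AND PROOFS =====
theorem funcGo_eq (l : List Int) : ∀ (mx ans n1 : Int),
    funcGo l mx ans n1 =
      if (l.zip (buildThresholds l mx)).any (fun p => p.1 > p.2) then n1 + 1
      else ans + (l.length : Int) := by
  induction l with
  | nil => intro mx ans n1; simp [funcGo, buildThresholds]
  | cons e rest ih =>
    intro mx ans n1
    simp only [funcGo, buildThresholds, List.zip_cons_cons, List.any_cons]
    by_cases h : e > mx
    · simp [h]
    · rw [if_neg h, ih]
      have hb : decide (e > mx) = false := by simpa using h
      simp only [hb, Bool.false_or]
      split_ifs <;> simp <;> push_cast <;> ring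

-- ===== VERDICT (by name: the statement is the Claim_ definition above) =====
theorem func_spec : Claim_equal_func := by
  intro even odd _ hpre
  unfold Spec_func func func_alt
  cases h : PySem.List.pyGet? odd (-1) with
  | none =>
    exfalso
    cases odd with
    | nil => exact hpre rfl
    | cons a t =>
      simp [PySem.List.pyGet?, PySem.List.pyIdx?] at h
  | some mx =>
    simp only [funcGo_eq]
    split_ifs <;> simp
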